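-- pv_equiv track=rewrite | github.com/ShreyaMangal/Cryptography_Algos | Ciphers.py | create_ptMatrix
-- ===== SOURCE A (Python) =====
-- def create_ptMatrix(plaintext, key_len, text_length):
--     for i in range(len(plaintext) - key_len * text_length):
--         plaintext += 'X'
--
--     ind = 0
--     textMatrix = [[0] * text_length for i in range(key_len)]
--     for i in range(key_len):
--         for j in range(text_length):
--             textMatrix[i][j] = ord(plaintext[ind]) % 65
--             ind += 1
--
--     return textMatrix
-- ===== SOURCE B (Python) =====
-- def create_ptMatrix(plaintext, key_len, text_length):
--     rows = max(key_len, 0)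
--     cols = max(text_length, 0)
--     flat = [ord(plaintext[k]) % 65 for k in range(rows * cols)]
--     return [flat[i * cols:(i + 1) * cols] for i in range(rows)]
-- ===== Notes on version B (the rewrite author's own statement) =====
-- stated objective: simpler
-- what changed: Drops the dead 'X'-padding loop (it only runs when the plaintext is already long enough, and the appended characters are never read) and replaces the preallocate-and-mutate nested fill with a single linear pass building a flat list of codes followed by a slice-based reshape into rows.
import Mathlib
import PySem

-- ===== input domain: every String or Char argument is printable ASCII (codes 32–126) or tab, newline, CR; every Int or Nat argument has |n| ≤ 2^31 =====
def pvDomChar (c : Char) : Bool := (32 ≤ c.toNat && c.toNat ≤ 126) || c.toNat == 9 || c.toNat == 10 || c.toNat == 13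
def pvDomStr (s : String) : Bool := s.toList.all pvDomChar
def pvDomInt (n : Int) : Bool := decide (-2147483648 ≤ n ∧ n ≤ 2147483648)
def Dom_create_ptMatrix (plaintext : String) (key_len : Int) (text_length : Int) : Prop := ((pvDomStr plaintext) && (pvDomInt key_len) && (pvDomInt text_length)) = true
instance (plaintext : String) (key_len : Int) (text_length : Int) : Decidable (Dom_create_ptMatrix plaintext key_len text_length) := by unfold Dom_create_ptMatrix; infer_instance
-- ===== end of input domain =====

-- B drops A's dead 'X'-padding loop and replaces the preallocate-and-mutate nested fill by a
-- flat linear pass over all codes followed by a slice-based reshape (objective: simpler).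

-- ===== PORT A =====
-- literal transliteration of A: the padding loop, the zero matrix, the nested index fill by mutation
def create_ptMatrix (plaintext : String) (key_len : Int) (text_length : Int) : List (List Int) :=
  let pt0 : List Char := plaintext.toList
  -- for i in range(len(plaintext) - key_len * text_length): plaintext += 'X'
  let pt : List Char :=
    (PySem.List.pyRange 0 (PySem.List.len pt0 - key_len * text_length)).foldl
      (fun s _ => s ++ ['X']) pt0
  -- textMatrix = [[0] * text_length for i in range(key_len)]
  let textMatrix : List (List Int) :=
    (PySem.List.pyRange 0 key_len).map (fun _ => List.replicate text_length.toNat (0 : Int))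
  -- ind = 0; for i in range(key_len): for j in range(text_length): textMatrix[i][j] = ord(plaintext[ind]) % 65; ind += 1
  let st : List (List Int) × Int :=
    (PySem.List.pyRange 0 key_len).foldl
      (fun (st : List (List Int) × Int) (i : Int) =>
        (PySem.List.pyRange 0 text_length).foldl
          (fun (st : List (List Int) × Int) (j : Int) =>
            (PySem.List.pySetD st.1 i
               (PySem.List.pySetD (PySem.List.pyGetD st.1 i []) j
                 (PySem.Int.mod ((PySem.List.pyGetD pt st.2 ' ').toNat : Int) 65)),
             st.2 + 1))
          st)
      (textMatrix, 0)
  st.1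

-- ===== PORT B =====
-- literal transliteration of B: flat list of codes, then reshape rows by slicing
def create_ptMatrix_alt (plaintext : String) (key_len : Int) (text_length : Int) : List (List Int) :=
  let pt : List Char := plaintext.toList
  let rows : Int := max key_len 0
  let cols : Int := max text_length 0
  let flat : List Int :=
    (PySem.List.pyRange 0 (rows * cols)).map
      (fun k => PySem.Int.mod ((PySem.List.pyGetD pt k ' ').toNat : Int) 65)
  (PySem.List.pyRange 0 rows).map
    (fun i => PySem.List.slice flat (some (i * cols)) (some ((i + 1) * cols)))

-- ===== PRECONDITION & SPEC =====
-- Pre_ excludes exactly the inputs where A raises IndexError: a positive matrix shape needing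
-- more characters than the plaintext has (the padding loop never pads, so indexing runs off the end).
def Pre_create_ptMatrix (plaintext : String) (key_len : Int) (text_length : Int) : Prop :=
  0 < key_len → 0 < text_length → key_len * text_length ≤ PySem.Str.len plaintext
instance (plaintext : String) (key_len : Int) (text_length : Int) : Decidable (Pre_create_ptMatrix plaintext key_len text_length) := by unfold Pre_create_ptMatrix; infer_instance
def pvWitness_create_ptMatrix : String × Int × Int := ("ATTACKNOW", 3, 3)

def Spec_create_ptMatrix (plaintext : String) (key_len : Int) (text_length : Int) (out : List (List Int)) : Prop := out = create_ptMatrix_alt plaintext key_len text_length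
instance (plaintext : String) (key_len : Int) (text_length : Int) (out : List (List Int)) : Decidable (Spec_create_ptMatrix plaintext key_len text_length out) := by unfold Spec_create_ptMatrix; infer_instance

-- ===== CLAIM (what is proved, stated in full; the proofs are below) =====
def Claim_equal_create_ptMatrix : Prop := ∀ (plaintext : String) (key_len : Int) (text_length : Int), Dom_create_ptMatrix plaintext key_len text_length → Pre_create_ptMatrix plaintext key_len text_length → Spec_create_ptMatrix plaintext key_len text_length (create_ptMatrix plaintext key_len text_length)

-- ===== LEMMAS AND PROOFS =====

-- the character-code map both ports compute
def pvCode (pt : List Char) (k : Int) : Int :=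
  PySem.Int.mod ((PySem.List.pyGetD pt k ' ').toNat : Int) 65

-- A's inner row-filling loop writes positions j .. j+n-1 with codes ind .. ind+n-1
theorem pvRowfill (pt : List Char) : ∀ (n j : Nat) (r : List Int) (ind : Int), r.length = j + n →
    List.foldl (fun (st : List Int × Int) (jj : Int) =>
        (PySem.List.pySetD st.1 jj (PySem.Int.mod ((PySem.List.pyGetD pt st.2 ' ').toNat : Int) 65), st.2 + 1))
      (r, ind) ((List.range' j n).map (fun (x : Nat) => (x : Int)))
    = (r.take j ++ (PySem.List.pyRange ind (ind + (n : Int))).map (pvCode pt), ind + (n : Int)) := by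
  intro n
  induction n with
  | zero =>
    intro j r ind h
    simp [List.take_of_length_le (show r.length ≤ j by omega)]
  | succ n ih =>
    intro j r ind h
    rw [List.range'_succ, List.map_cons, List.foldl_cons]
    have hstep : PySem.List.pySetD r ((j : Nat) : Int)
        (PySem.Int.mod ((PySem.List.pyGetD pt ind ' ').toNat : Int) 65)
        = r.set j (pvCode pt ind) := by
      rw [PySem.List.pySetD_of_nonneg _ _ (by positivity)]; simp [pvCode]
    rw [hstep, ih (j + 1) (r.set j (pvCode pt ind)) (ind + 1) (by simp [h]; omega)]
    have hcons : PySem.List.pyRange ind (ind + ((n : Int) + 1))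
        = ind :: PySem.List.pyRange (ind + 1) (ind + ((n : Int) + 1)) :=
      PySem.List.pyRange_one_cons (by omega)
    have htake : (r.set j (pvCode pt ind)).take (j + 1) = r.take j ++ [pvCode pt ind] := by
      rw [List.take_add_one]
      simp [List.take_set, show j < r.length by omega, List.set_eq_of_length_le]
    rw [Prod.ext_iff]
    refine ⟨?_, by push_cast; ring⟩
    simp only [htake]
    push_cast
    rw [hcons]
    simp [List.append_assoc]
    congr 2
    omega

-- A's inner loop touches only row iN of the matrix: it factors through a fold on that row
theorem pvMatlift (pt : List Char) (iN : Nat) : ∀ (js : List Int) (m : List (List Int)) (ind : Int)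
    (h : iN < m.length),
    List.foldl (fun (st : List (List Int) × Int) (j : Int) =>
        (PySem.List.pySetD st.1 ((iN : Nat) : Int)
           (PySem.List.pySetD (PySem.List.pyGetD st.1 ((iN : Nat) : Int) []) j
             (PySem.Int.mod ((PySem.List.pyGetD pt st.2 ' ').toNat : Int) 65)), st.2 + 1))
      (m, ind) js
    = (m.set iN (List.foldl (fun (st : List Int × Int) (j : Int) =>
          (PySem.List.pySetD st.1 j (PySem.Int.mod ((PySem.List.pyGetD pt st.2 ' ').toNat : Int) 65), st.2 + 1))
          ((m[iN]'h), ind) js).1,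
       (List.foldl (fun (st : List Int × Int) (j : Int) =>
          (PySem.List.pySetD st.1 j (PySem.Int.mod ((PySem.List.pyGetD pt st.2 ' ').toNat : Int) 65), st.2 + 1))
          ((m[iN]'h), ind) js).2) := by
  intro js
  induction js with
  | nil => intro m ind h; simp [List.set_getElem_self]
  | cons j js ih =>
    intro m ind h
    have hget : PySem.List.pyGetD m ((iN : Nat) : Int) [] = m[iN]'h := by
      rw [PySem.List.pyGetD_eq_getElem _ _ (by positivity) (by exact_mod_cast h)]; simp
    have hset : ∀ (r : List Int), PySem.List.pySetD m ((iN : Nat) : Int) r = m.set iN r := by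
      intro r; rw [PySem.List.pySetD_of_nonneg _ _ (by positivity)]; simp
    simp only [List.foldl_cons, hget, hset]
    rw [ih (m.set iN (PySem.List.pySetD (m[iN]'h) j
          (PySem.Int.mod ((PySem.List.pyGetD pt ind ' ').toNat : Int) 65))) (ind + 1) (by simpa using h)]
    simp [List.set_set]

-- A's outer loop fills rows i0 .. i0+n-1 left to right with consecutive code blocks
theorem pvOuterfill (pt : List Char) (tl : Int) (htl : 0 < tl) :
    ∀ (n i0 : Nat) (P : List (List Int)) (ind : Int), P.length = i0 →
    List.foldl (fun (st : List (List Int) × Int) (i : Int) =>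
        List.foldl (fun (st : List (List Int) × Int) (j : Int) =>
            (PySem.List.pySetD st.1 i
               (PySem.List.pySetD (PySem.List.pyGetD st.1 i []) j
                 (PySem.Int.mod ((PySem.List.pyGetD pt st.2 ' ').toNat : Int) 65)), st.2 + 1))
          st (PySem.List.pyRange 0 tl))
      (P ++ List.replicate n (List.replicate tl.toNat 0), ind)
      ((List.range' i0 n).map (fun (x : Nat) => (x : Int)))
    = (P ++ (List.range n).map
          (fun (t : Nat) => (PySem.List.pyRange (ind + (t : Int) * tl) (ind + (t : Int) * tl + tl)).map (pvCode pt)),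
       ind + (n : Int) * tl) := by
  intro n
  induction n with
  | zero => intro i0 P ind h; simp
  | succ n ih =>
    intro i0 P ind h
    rw [List.range'_succ, List.map_cons, List.foldl_cons]
    have hm : (P ++ List.replicate (n + 1) (List.replicate tl.toNat 0)).length = i0 + (n + 1) := by
      simp [h]
    have hi0 : i0 < (P ++ List.replicate (n + 1) (List.replicate tl.toNat 0)).length := by omega
    have hrange : PySem.List.pyRange 0 tl = (List.range' 0 tl.toNat).map (fun (x : Nat) => (x : Int)) := by
      rw [PySem.List.pyRange_one, ← List.range_eq_range']
      simp
    have hgetrow : (P ++ List.replicate (n + 1) (List.replicate tl.toNat 0))[i0]'(hi0)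
        = List.replicate tl.toNat (0 : Int) := by
      rw [List.getElem_append_right (by omega)]
      simp [h]
    rw [hrange, pvMatlift pt i0 _ _ _ hi0, hgetrow, pvRowfill pt tl.toNat 0 _ ind (by simp)]
    simp only [List.take_zero, List.nil_append, ← hrange]
    have hT : ((tl.toNat : Nat) : Int) = tl := Int.toNat_of_nonneg (le_of_lt htl)
    have hsetrow : (P ++ List.replicate (n + 1) (List.replicate tl.toNat 0)).set i0
        ((PySem.List.pyRange ind (ind + ((tl.toNat : Nat) : Int))).map (pvCode pt))
        = (P ++ [(PySem.List.pyRange ind (ind + tl)).map (pvCode pt)]) ++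
          List.replicate n (List.replicate tl.toNat 0) := by
      rw [List.replicate_succ, ← h, List.set_append_right _ _ (by omega)]
      simp [hT]
    rw [hsetrow, ih (i0 + 1) (P ++ [(PySem.List.pyRange ind (ind + tl)).map (pvCode pt)])
          (ind + ((tl.toNat : Nat) : Int)) (by simp [h])]
    rw [hT, Prod.ext_iff]
    refine ⟨?_, by push_cast; ring⟩
    rw [List.range_succ_eq_map, List.map_cons, List.map_map, List.append_assoc, List.singleton_append]
    refine congrArg (P ++ ·) ((List.cons_eq_cons).mpr ⟨by simp, List.map_congr_left ?_⟩)
    intro t _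
    simp only [Function.comp_apply]
    congr 2 <;> push_cast <;> ring

-- a slice of the flat code list is the code map over the corresponding index range
theorem pvBslice (f : Int → Int) (kl tl : Int) (htl : 0 < tl) (i : Int) (h0 : 0 ≤ i) (hik : i < kl) :
    PySem.List.slice ((PySem.List.pyRange 0 (kl * tl)).map f) (some (i * tl)) (some ((i + 1) * tl))
    = (PySem.List.pyRange (i * tl) ((i + 1) * tl)).map f := by
  have h1 : (0 : Int) ≤ i * tl := by positivity
  have h2 : i * tl ≤ (i + 1) * tl := by nlinarith
  have h3 : (i + 1) * tl ≤ kl * tl := by nlinarith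
  rw [PySem.List.slice_toNat _ h1 (by omega)]
  rw [PySem.List.pyRange_one_append 0 (i * tl) (kl * tl) h1 (by omega),
      PySem.List.pyRange_one_append (i * tl) ((i + 1) * tl) (kl * tl) h2 h3]
  rw [List.map_append, List.drop_left' (by simp [PySem.List.length_pyRange_one])]
  rw [List.map_append, List.take_left' (by simp [PySem.List.length_pyRange_one]; omega)]

-- the padded plaintext agrees with the original on every index below the original length
theorem pvCode_pad (pt0 ext : List Char) (k : Int) (h0 : 0 ≤ k) (h1 : k < (pt0.length : Int)) :
    pvCode (pt0 ++ ext) k = pvCode pt0 k := by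
  unfold pvCode
  have hk2 : k < (((pt0 ++ ext).length : Nat) : Int) := by
    rw [List.length_append]; push_cast; omega
  rw [PySem.List.pyGetD_eq_getElem (pt0 ++ ext) ' ' h0 hk2,
      PySem.List.pyGetD_eq_getElem pt0 ' ' h0 h1]
  have hlt : k.toNat < pt0.length := by omega
  have : (pt0 ++ ext)[k.toNat]'(by rw [List.length_append]; omega) = pt0[k.toNat]'hlt :=
    List.getElem_append_left hlt
  rw [this]

-- ===== VERDICT (by name: the statement is the Claim_ definition above) =====
theorem create_ptMatrix_spec : Claim_equal_create_ptMatrix := by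
  intro plaintext key_len text_length _ hpre
  unfold Spec_create_ptMatrix create_ptMatrix create_ptMatrix_alt
  set pt0 : List Char := plaintext.toList with hpt0
  by_cases hk : 0 < key_len
  · by_cases ht : 0 < text_length
    · -- main case: positive shape, enough characters
      have hlen : key_len * text_length ≤ (pt0.length : Int) := by
        have := hpre hk ht
        rwa [PySem.Str.len_eq] at this
      have hmaxk : max key_len 0 = key_len := max_eq_left (le_of_lt hk)
      have hmaxt : max text_length 0 = text_length := max_eq_left (le_of_lt ht)
      simp only [hmaxk, hmaxt]
      have hpad : (PySem.List.pyRange 0 (PySem.List.len pt0 - key_len * text_length)).foldl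
          (fun s _ => s ++ ['X']) pt0
          = pt0 ++ (PySem.List.pyRange 0 (PySem.List.len pt0 - key_len * text_length)).map
              (fun _ => 'X') :=
        PySem.List.foldl_append_singleton_eq_map (fun _ => 'X') _ pt0
      rw [hpad]
      have hinit : (PySem.List.pyRange 0 key_len).map
            (fun _ => List.replicate text_length.toNat (0 : Int))
          = [] ++ List.replicate key_len.toNat (List.replicate text_length.toNat 0) := by
        rw [List.map_const']
        simp [PySem.List.length_pyRange_one]
      rw [hinit]
      have hrangeK : PySem.List.pyRange 0 key_len
          = (List.range' 0 key_len.toNat).map (fun (x : Nat) => (x : Int)) := by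
        rw [PySem.List.pyRange_one, ← List.range_eq_range']
        simp
      rw [hrangeK,
          pvOuterfill (pt0 ++ (PySem.List.pyRange 0 (PySem.List.len pt0 - key_len * text_length)).map
            (fun _ => 'X')) text_length ht key_len.toNat 0 [] 0 rfl]
      rw [← List.range_eq_range', List.map_map]
      simp only [List.nil_append]
      apply List.map_congr_left
      intro t hmem
      have htK : t < key_len.toNat := List.mem_range.mp hmem
      have htk : (t : Int) < key_len := by omega
      rw [Function.comp_apply,
          pvBslice _ key_len text_length ht (t : Int) (by positivity) htk]
      have hre : PySem.List.pyRange (0 + (t : Int) * text_length) (0 + (t : Int) * text_length + text_length)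
          = PySem.List.pyRange ((t : Int) * text_length) (((t : Int) + 1) * text_length) := by
        congr 1 <;> ring
      rw [hre]
      apply List.map_congr_left
      intro k hkmem
      have hkb := (PySem.List.mem_pyRange_one).mp hkmem
      have hub : ((t : Int) + 1) * text_length ≤ key_len * text_length := by nlinarith
      have h0k : 0 ≤ k := le_trans (mul_nonneg (Int.natCast_nonneg t) (le_of_lt ht)) hkb.1
      rw [pvCode_pad pt0 _ k h0k (by linarith [hkb.2, hub, hlen])]
      rfl
    · -- text_length ≤ 0: every row is empty on both sides
      have hrt : PySem.List.pyRange 0 text_length = [] := by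
        rw [PySem.List.pyRange_one]; simp; omega
      have ht0 : text_length.toNat = 0 := by omega
      have hmaxk : max key_len 0 = key_len := max_eq_left (le_of_lt hk)
      have hmaxt : max text_length 0 = 0 := max_eq_right (by omega)
      simp [hrt, ht0, hmaxk, hmaxt, PySem.List.pyRange_zero, PySem.List.slice, PySem.List.clampIdx]
  · -- key_len ≤ 0: no rows on either side
    have hr : PySem.List.pyRange 0 key_len = [] := by
      rw [PySem.List.pyRange_one]; simp; omega
    have hmaxk : max key_len 0 = 0 := max_eq_right (by omega)
    simp [hr, hmaxk, PySem.List.pyRange_zero]
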